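-- pv_equiv track=rewrite | github.com/JuanPabl0770/Challange | mainChallenge.py | mostFrequentNgram
-- ===== SOURCE A (Python) =====
-- def calculate_Ngrams(text, N):
--     list_Ngrams = []
--     if N == 1:
--         for i in text:
--             list_Ngrams.append(i)
--         #endfor
--     elif N == len(text):
--         list_Ngrams.append(text)
--     else:
--         for i in range(len(text)):
--             gram = text[i:i + N]
--             if len(gram) == N:
--                 list_Ngrams.append(text[i:i + N])
--             else:
--                 break
--         #end_for
--     #end_if
--     return list_Ngrams
--
-- def mostFrequentNgram(text,N):
--     ngrams = calculate_Ngrams(text,N)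
--     ngram_reps = []
--     cantMostFrequent = 0;
--     posMostFrequent = 0;
--
--     for i in range (len(ngrams)):
--         for j in ngram_reps:
--             if j[0] == ngrams[i]:
--                 j[1] += 1
--                 if j[1] > cantMostFrequent:
--                     cantMostFrequent = j[1]
--                     posMostFrequent = i
--                 break
--         #endfor
--         ngram_reps.append([ngrams[i],1])
--     #end for
--     return [ngrams[posMostFrequent]]
-- ===== SOURCE B (Python) =====
-- def calculate_Ngrams(text, N):
--     list_Ngrams = []
--     if N == 1:
--         for i in text:
--             list_Ngrams.append(i)
--     elif N == len(text):
--         list_Ngrams.append(text)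
--     else:
--         for i in range(len(text)):
--             gram = text[i:i + N]
--             if len(gram) == N:
--                 list_Ngrams.append(text[i:i + N])
--             else:
--                 break
--     return list_Ngrams
--
-- def mostFrequentNgram(text, N):
--     ngrams = calculate_Ngrams(text, N)
--     # pass 1: full frequency table, peak = the maximum frequency
--     counts = {}
--     for g in ngrams:
--         counts[g] = counts.get(g, 0) + 1
--     peak = max(counts.values())
--     # pass 2: return the first n-gram whose running count reaches the peak
--     seen = {}
--     for g in ngrams:
--         c = seen.get(g, 0) + 1
--         seen[g] = c
--         if c == peak:
--             return [g]
-- ===== Notes on version B (the rewrite author's own statement) =====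
-- stated objective: faster
-- what changed: Replaces A's single pass over a mutable [gram,count] list with an inner linear scan per n-gram (tracking a strictly-increasing running maximum) by two dict passes: one pass builds a full frequency table and takes its maximum, a second pass returns the first n-gram whose running count reaches that maximum, which reproduces A's first-to-reach-peak tie-break exactly.
import Mathlib
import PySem

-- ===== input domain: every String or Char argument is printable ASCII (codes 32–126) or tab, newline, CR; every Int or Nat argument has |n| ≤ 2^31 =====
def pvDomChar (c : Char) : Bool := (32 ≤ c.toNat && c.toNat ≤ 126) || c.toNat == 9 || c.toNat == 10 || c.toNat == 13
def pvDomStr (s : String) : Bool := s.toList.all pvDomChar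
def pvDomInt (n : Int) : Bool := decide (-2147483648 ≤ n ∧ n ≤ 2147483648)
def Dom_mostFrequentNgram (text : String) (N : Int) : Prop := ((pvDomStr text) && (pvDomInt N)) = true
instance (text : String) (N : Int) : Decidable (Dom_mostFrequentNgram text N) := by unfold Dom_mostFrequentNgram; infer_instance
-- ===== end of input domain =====

-- B replaces A's single pass over a mutable [gram,count] list (with an inner linear scan per n-gram)
-- by two dict passes: build the full frequency table and its maximum, then return the first n-gram
-- whose running count reaches that maximum.  Objective: faster (the per-element inner scan disappears).

-- ===== PORT A =====
-- Strings are modelled by their character lists (PySem.Chars); each n-gram is a List Char,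
-- wrapped with String.ofList on return.  This is exact: Python string slicing/equality agree.

-- 'for i in range(len(text)): gram = text[i:i+N]; if len(gram)==N: append else break'
def calcNgramsGo (cs : List Char) (N : Int) (i : Nat) (acc : List (List Char)) : List (List Char) :=
  if h : i < cs.length then
    let gram := PySem.List.slice cs (some (i : Int)) (some ((i : Int) + N))
    if (gram.length : Int) = N then calcNgramsGo cs N (i + 1) (acc ++ [gram]) else acc
  else acc
termination_by cs.length - i

-- shared helper calculate_Ngrams (identical in Source A and Source B)
def calcNgrams (text : String) (N : Int) : List (List Char) :=
  let cs := text.toList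
  if N = 1 then cs.foldl (fun acc c => acc ++ [[c]]) []
  else if N = (cs.length : Int) then [cs]
  else calcNgramsGo cs N 0 []

-- inner loop 'for j in ngram_reps: if j[0] == g: j[1] += 1; break' — returns the list after the
-- in-place increment of the FIRST matching entry, and the incremented count (none = no match)
def bumpReps (reps : List (List Char × Int)) (g : List Char) : List (List Char × Int) × Option Int :=
  match reps with
  | [] => ([], none)
  | (k, v) :: rest =>
    if k = g then ((k, v + 1) :: rest, some (v + 1))
    else
      let r := bumpReps rest g
      ((k, v) :: r.1, r.2)

-- one iteration of A's outer loop; state = (ngram_reps, cantMostFrequent, posMostFrequent)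
def stepA (s : List (List Char × Int) × Int × Int) (p : Int × List Char) :
    List (List Char × Int) × Int × Int :=
  let r := bumpReps s.1 p.2
  let reps' := r.1 ++ [(p.2, 1)]
  match r.2 with
  | some c => if s.2.1 < c then (reps', c, p.1) else (reps', s.2.1, s.2.2)
  | none => (reps', s.2.1, s.2.2)

def mostFrequentNgram (text : String) (N : Int) : List String :=
  let ngrams := calcNgrams text N
  let st := (PySem.List.enumerate ngrams 0).foldl stepA ([], 0, 0)
  match PySem.List.pyGet? ngrams st.2.2 with
  | some g => [String.ofList g]
  | none => []   -- Python raises IndexError here (ngrams empty); excluded by Pre_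

-- ===== PORT B =====
-- second pass of Source B: return the first n-gram whose running count reaches peak
def goPeak (seen : PySem.Dict (List Char) Int) (rest : List (List Char)) (peak : Int) :
    List String :=
  match rest with
  | [] => []   -- Python falls off the loop returning None; unreachable: peak is attained
  | g :: rest' =>
    let c := seen.getD g 0 + 1
    let seen' := seen.insert g c
    if c = peak then [String.ofList g] else goPeak seen' rest' peak

def mostFrequentNgram_alt (text : String) (N : Int) : List String :=
  let ngrams := calcNgrams text N
  let counts := ngrams.foldl (fun d g => d.insert g (d.getD g 0 + 1)) PySem.Dict.empty
  match PySem.List.max? counts.values (fun x => x) with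
  | none => []   -- Python: max() on empty raises ValueError (ngrams empty); excluded by Pre_
  | some peak => goPeak PySem.Dict.empty ngrams peak

-- ===== PRECONDITION & SPEC =====
-- Pre_ excludes exactly the inputs where A raises: calculate_Ngrams is empty (then ngrams[pos]
-- raises IndexError in A, and max() raises ValueError in B), which happens iff N < 0 or N > len(text).
def Pre_mostFrequentNgram (text : String) (N : Int) : Prop :=
  0 ≤ N ∧ N ≤ (text.toList.length : Int)
instance (text : String) (N : Int) : Decidable (Pre_mostFrequentNgram text N) := by
  unfold Pre_mostFrequentNgram; infer_instance

def pvWitness_mostFrequentNgram : String × Int := ("aba", 2)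

def Spec_mostFrequentNgram (text : String) (N : Int) (out : List String) : Prop :=
  out = mostFrequentNgram_alt text N
instance (text : String) (N : Int) (out : List String) :
    Decidable (Spec_mostFrequentNgram text N out) := by
  unfold Spec_mostFrequentNgram; infer_instance

-- ===== CLAIM (what is proved, stated in full; the proofs are below) =====
def Claim_equal_mostFrequentNgram : Prop :=
  ∀ (text : String) (N : Int), Dom_mostFrequentNgram text N →
    Pre_mostFrequentNgram text N →
    Spec_mostFrequentNgram text N (mostFrequentNgram text N)

-- ===== LEMMAS AND PROOFS =====

def pvPc (p : List (List Char)) (i : Nat) : Nat := (p.take (i + 1)).count (p.getD i [])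
def pvMx (p : List (List Char)) : Nat := ((List.range p.length).map (pvPc p)).foldl max 0

theorem pvPc_prefix (q r : List (List Char)) (i : Nat) (h : i < q.length) :
    pvPc (q ++ r) i = pvPc q i := by
  unfold pvPc
  rw [List.take_append_of_le_length (by omega), List.getD_append _ _ _ _ h]

theorem pvPc_at (q r : List (List Char)) (g : List Char) :
    pvPc (q ++ g :: r) q.length = q.count g + 1 := by
  unfold pvPc
  have h1 : (q ++ g :: r).take (q.length + 1) = q ++ [g] := by
    rw [List.take_append]
    simp
  have h2 : (q ++ g :: r).getD q.length [] = g := by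
    simp [List.getD_eq_getElem?_getD]
  rw [h1, h2, List.count_append]
  simp

theorem pvPc_le_count (p : List (List Char)) (i : Nat) :
    pvPc p i ≤ p.count (p.getD i []) := by
  exact (List.take_sublist _ _).count_le _

theorem pvMx_append (q : List (List Char)) (g : List Char) :
    pvMx (q ++ [g]) = max (pvMx q) (q.count g + 1) := by
  unfold pvMx
  rw [List.length_append, List.length_singleton, List.range_succ, List.map_append,
    List.foldl_append]
  have h1 : (List.range q.length).map (pvPc (q ++ [g])) = (List.range q.length).map (pvPc q) := by
    apply List.map_congr_left
    intro i hi
    exact pvPc_prefix q [g] i (List.mem_range.mp hi)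
  rw [h1]
  simp [pvPc_at q [] g]

theorem pvPc_le_pvMx (p : List (List Char)) (i : Nat) (h : i < p.length) :
    pvPc p i ≤ pvMx p := by
  have := (PySem.List.le_foldl_max ((List.range p.length).map (pvPc p)) 0).2
  exact this _ (List.mem_map_of_mem (List.mem_range.mpr h))


theorem pvPc_zero' (p : List (List Char)) (h : p ≠ []) : pvPc p 0 = 1 := by
  cases p with
  | nil => exact absurd rfl h
  | cons g t => simp [pvPc]

theorem bump_none_fst (reps : List (List Char × Int)) (g : List Char)
    (h : (bumpReps reps g).2 = none) : (bumpReps reps g).1 = reps := by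
  induction reps with
  | nil => rfl
  | cons p rest ih =>
    obtain ⟨k, v⟩ := p
    by_cases hk : k = g
    · simp [bumpReps, hk] at h
    · simp [bumpReps, hk] at h ⊢
      exact ih h

theorem bump_append_some (reps l : List (List Char × Int)) (g : List Char) (c : Int)
    (h : (bumpReps reps g).2 = some c) :
    bumpReps (reps ++ l) g = ((bumpReps reps g).1 ++ l, some c) := by
  induction reps with
  | nil => simp [bumpReps] at h
  | cons p rest ih =>
    obtain ⟨k, v⟩ := p
    by_cases hk : k = g
    · simp [bumpReps, hk] at h ⊢; omega
    · simp [bumpReps, hk] at h ⊢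
      rw [ih h]
      exact ⟨rfl, rfl⟩

theorem bump_append_none (reps l : List (List Char × Int)) (g : List Char)
    (h : (bumpReps reps g).2 = none) :
    bumpReps (reps ++ l) g = (reps ++ (bumpReps l g).1, (bumpReps l g).2) := by
  induction reps with
  | nil => simp [bumpReps]
  | cons p rest ih =>
    obtain ⟨k, v⟩ := p
    by_cases hk : k = g
    · simp [bumpReps, hk] at h
    · simp [bumpReps, hk] at h ⊢
      rw [ih h]
      simp

theorem bump_other (reps : List (List Char × Int)) (g h : List Char) (hne : h ≠ g) :
    (bumpReps (bumpReps reps g).1 h).2 = (bumpReps reps h).2 := by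
  induction reps with
  | nil => rfl
  | cons p rest ih =>
    obtain ⟨k, v⟩ := p
    by_cases hk : k = g
    · subst hk
      simp [bumpReps, hne, Ne.symm hne]
    · by_cases hk2 : k = h
      · subst hk2
        simp [bumpReps, hk, hne]
      · simp [bumpReps, hk, hk2, ih]

theorem bump_self (reps : List (List Char × Int)) (g : List Char) (c : Int)
    (h : (bumpReps reps g).2 = some c) :
    (bumpReps (bumpReps reps g).1 g).2 = some (c + 1) := by
  induction reps with
  | nil => simp [bumpReps] at h
  | cons p rest ih =>
    obtain ⟨k, v⟩ := p
    by_cases hk : k = g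
    · simp [bumpReps, hk] at h ⊢; omega
    · simp [bumpReps, hk] at h ⊢
      exact ih h

theorem enumerate_append_singleton (q : List (List Char)) (g : List Char) (s : Int) :
    PySem.List.enumerate (q ++ [g]) s = PySem.List.enumerate q s ++ [(s + q.length, g)] := by
  induction q generalizing s with
  | nil => simp [PySem.List.enumerate_cons, PySem.List.enumerate_nil]
  | cons x xs ih =>
    simp only [List.cons_append, PySem.List.enumerate_cons, ih, List.length_cons]
    have : s + 1 + (xs.length : Int) = s + ((xs.length + 1 : Nat) : Int) := by push_cast; ring
    rw [this]

theorem calcGo_append (cs : List Char) (N : Int) :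
    ∀ i acc, calcNgramsGo cs N i acc = acc ++ calcNgramsGo cs N i [] := by
  intro i
  induction hn : cs.length - i using Nat.strong_induction_on generalizing i with
  | _ n ih =>
    intro acc
    rw [calcNgramsGo, calcNgramsGo]
    by_cases h : i < cs.length
    · simp only [h, dite_true]
      split
      · rw [ih (cs.length - (i+1)) (by omega) (i+1) rfl,
          ih (cs.length - (i+1)) (by omega) (i+1) rfl ([] ++ _)]
        simp
      · simp
    · simp [h]

theorem calcNgrams_ne_nil (text : String) (N : Int)
    (h : Pre_mostFrequentNgram text N) : calcNgrams text N ≠ [] := by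
  obtain ⟨h0, hlen⟩ := h
  unfold calcNgrams
  by_cases h1 : N = 1
  · simp only [h1, if_true]
    rw [PySem.List.foldl_append_singleton_eq_map]
    have : text.toList ≠ [] := by
      intro he; rw [he] at hlen; simp [h1] at hlen
    simpa using this
  · simp only [h1, if_false]
    by_cases h2 : N = (text.toList.length : Int)
    · simp [h2]
    · simp only [h2, if_false]
      have hlt : N < (text.toList.length : Int) := lt_of_le_of_ne hlen h2
      have hpos : 0 < text.toList.length := by omega
      rw [calcNgramsGo]
      simp only [hpos, dite_true]
      have hsl : PySem.List.slice text.toList (some ((0:Nat) : Int)) (some (((0:Nat) : Int) + N))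
          = text.toList.take N.toNat := by
        rw [PySem.List.slice_toNat _ (by omega) (by omega)]
        simp
      rw [hsl]
      have hlena : ((text.toList.take N.toNat).length : Int) = N := by
        rw [List.length_take]
        omega
      rw [if_pos hlena, calcGo_append]
      simp

-- reps invariant preserved through one outer iteration
theorem reps_inv_step (q : List (List Char)) (reps : List (List Char × Int)) (g : List Char)
    (hinv : ∀ h, (bumpReps reps h).2 =
      if q.count h = 0 then none else some ((q.count h : Int) + 1)) :
    ∀ h, (bumpReps ((bumpReps reps g).1 ++ [(g, 1)]) h).2 =
      if (q ++ [g]).count h = 0 then none else some (((q ++ [g]).count h : Int) + 1) := by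
  intro h
  have hcnt : (q ++ [g]).count h = q.count h + (if h = g then 1 else 0) := by
    rw [List.count_append]
    by_cases hg : h = g <;> simp [hg, Ne.symm]
  by_cases hg : h = g
  · subst hg
    by_cases hc : q.count h = 0
    · have hn : (bumpReps reps h).2 = none := by rw [hinv h, if_pos hc]
      rw [bump_none_fst reps h hn, bump_append_none reps [(h,1)] h hn]
      simp [bumpReps, hcnt, hc]
    · have hs : (bumpReps reps h).2 = some ((q.count h : Int) + 1) := by
        rw [hinv h, if_neg hc]
      have hs2 := bump_self reps h _ hs
      rw [bump_append_some _ [(h,1)] h _ hs2]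
      simp [hcnt, hc]
  · have hother : (bumpReps ((bumpReps reps g).1) h).2 = (bumpReps reps h).2 :=
      bump_other reps g h hg
    by_cases hc : q.count h = 0
    · have hn : (bumpReps (bumpReps reps g).1 h).2 = none := by
        rw [hother, hinv h, if_pos hc]
      rw [bump_append_none _ [(g,1)] h hn]
      simp [bumpReps, hcnt, hc, Ne.symm hg]
      exact hg
    · have hs : (bumpReps (bumpReps reps g).1 h).2 = some ((q.count h : Int) + 1) := by
        rw [hother, hinv h, if_neg hc]
      rw [bump_append_some _ [(g,1)] h _ hs]
      simp [hcnt, hc, hg]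

def StateOK (p : List (List Char)) (s : List (List Char × Int) × Int × Int) : Prop :=
  (∀ g, (bumpReps s.1 g).2 =
      if p.count g = 0 then none else some ((p.count g : Int) + 1)) ∧
  (s.2.1 = if 2 ≤ pvMx p then (pvMx p : Int) else 0) ∧
  (∀ g, p.count g ≤ pvMx p) ∧
  0 ≤ s.2.2 ∧
  (2 ≤ pvMx p →
    s.2.2.toNat < p.length ∧ pvPc p s.2.2.toNat = pvMx p ∧
      ∀ j < s.2.2.toNat, pvPc p j ≠ pvMx p) ∧
  (pvMx p ≤ 1 → s.2.2 = 0)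

theorem foldA_ok (p : List (List Char)) :
    StateOK p ((PySem.List.enumerate p 0).foldl stepA ([], 0, 0)) := by
  induction p using List.reverseRecOn with
  | nil =>
    refine ⟨fun g => by simp [bumpReps], by decide, fun g => by simp [pvMx], by decide,
      fun h => by simp [pvMx] at h, fun _ => rfl⟩
  | append_singleton q g ih =>
    rw [enumerate_append_singleton, List.foldl_append]
    simp only [List.foldl_cons, List.foldl_nil]
    obtain ⟨h1, h2, h3, h4, h5, h6⟩ := ih
    revert h1 h2 h3 h4 h5 h6
    generalize (PySem.List.enumerate q 0).foldl stepA (([], 0, 0) :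
      List (List Char × Int) × Int × Int) = st
    obtain ⟨reps, cant, pos⟩ := st
    intro h1 h2 h3 h4 h5 h6
    dsimp only at h1 h2 h4 h5 h6 ⊢
    have hMx := pvMx_append q g
    have hcount : ∀ h, (q ++ [g]).count h = q.count h + (if h = g then 1 else 0) := by
      intro h
      rw [List.count_append]
      by_cases hg : h = g <;> simp [hg, Ne.symm]
    have hlen : (q ++ [g]).length = q.length + 1 := by simp
    have hpcpre : ∀ j < q.length, pvPc (q ++ [g]) j = pvPc q j := fun j hj => pvPc_prefix q [g] j hj
    have hpcat : pvPc (q ++ [g]) q.length = q.count g + 1 := pvPc_at q [] g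
    have hinv' := reps_inv_step q reps g h1
    by_cases hc0 : q.count g = 0
    -- first occurrence of g: bump misses, cant/pos unchanged
    · have hbn : (bumpReps reps g).2 = none := by rw [h1 g, if_pos hc0]
      have hstep : stepA (reps, cant, pos) (0 + (q.length : Int), g) = ((bumpReps reps g).1 ++ [(g, 1)], cant, pos) := by
        simp only [stepA]
        rw [hbn]
      rw [hstep]
      unfold StateOK
      dsimp only
      have hMx' : pvMx (q ++ [g]) = max (pvMx q) 1 := by rw [hMx, hc0]
      refine ⟨hinv', ?_, ?_, h4, ?_, ?_⟩
      · rw [hMx', h2]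
        by_cases h : 2 ≤ pvMx q
        · rw [if_pos h, if_pos (by omega)]
          congr 1
          omega
        · rw [if_neg h, if_neg (by omega)]
      · intro h
        rw [hcount h, hMx']
        by_cases hg : h = g
        · subst hg; simp [hc0]
        · simp only [hg, if_false, add_zero]
          have := h3 h
          omega
      · intro hge
        rw [hMx'] at hge
        have hq2 : 2 ≤ pvMx q := by omega
        obtain ⟨p1, p2, p3⟩ := h5 hq2
        have hMeq : max (pvMx q) 1 = pvMx q := by omega
        rw [hMx', hMeq]
        refine ⟨by omega, ?_, ?_⟩
        · rw [hpcpre _ p1]; exact p2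
        · intro j hj; rw [hpcpre _ (by omega)]; exact p3 j hj
      · intro hle
        rw [hMx'] at hle
        exact h6 (by omega)
    -- repeat occurrence: bump returns the incremented count c = count+1
    · have hbs : (bumpReps reps g).2 = some ((q.count g : Int) + 1) := by
        rw [h1 g, if_neg hc0]
      have hcn : (q ++ [g]).count g = q.count g + 1 := by simp
      have hc1 : 1 ≤ q.count g := by omega
      by_cases hlt : cant < (q.count g : Int) + 1
      -- running max strictly increases: cant := c, pos := current index
      · have hstep : stepA (reps, cant, pos) (0 + (q.length : Int), g) =
            ((bumpReps reps g).1 ++ [(g, 1)], (q.count g : Int) + 1, 0 + (q.length : Int)) := by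
          simp only [stepA]
          rw [hbs]
          simp only [if_pos hlt]
        rw [hstep]
        unfold StateOK
        dsimp only
        -- show the new max is exactly count+1
        have hMq : pvMx q < q.count g + 1 := by
          by_cases h : 2 ≤ pvMx q
          · rw [if_pos h] at h2; rw [h2] at hlt; omega
          · have := h3 g; omega
        have hMx' : pvMx (q ++ [g]) = q.count g + 1 := by rw [hMx]; omega
        have hge2 : 2 ≤ pvMx (q ++ [g]) := by
          rw [hMx']
          have := h3 g
          by_cases h : 2 ≤ pvMx q
          · omega
          · rw [if_neg (by omega)] at h2; omega
        refine ⟨hinv', ?_, ?_, by omega, ?_, by omega⟩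
        · rw [if_pos hge2, hMx']; push_cast; ring
        · intro h
          rw [hcount h, hMx']
          by_cases hg : h = g
          · subst hg; rw [← hcount h]; omega
          · simp only [hg, if_false, add_zero]
            have := h3 h
            omega
        · intro _
          have htn : (0 + (q.length : Int)).toNat = q.length := by omega
          rw [htn, hMx']
          refine ⟨by simp, by rw [hpcat], ?_⟩
          intro j hj
          rw [hpcpre _ hj]
          have := pvPc_le_pvMx q j hj
          omega
      -- no strict increase: state unchanged
      · have hstep : stepA (reps, cant, pos) (0 + (q.length : Int), g) =
            ((bumpReps reps g).1 ++ [(g, 1)], cant, pos) := by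
          simp only [stepA]
          rw [hbs]
          simp only [if_neg hlt]
        rw [hstep]
        unfold StateOK
        dsimp only
        have hq2 : 2 ≤ pvMx q := by
          by_contra hq
          rw [if_neg (by omega)] at h2
          rw [h2] at hlt
          push_neg at hlt
          have : (0:Int) < (q.count g : Int) + 1 := by positivity
          omega
        rw [if_pos hq2] at h2
        have hcle : q.count g + 1 ≤ pvMx q := by
          rw [h2] at hlt
          push_neg at hlt
          exact_mod_cast hlt
        have hMx' : pvMx (q ++ [g]) = pvMx q := by rw [hMx]; omega
        refine ⟨hinv', ?_, ?_, h4, ?_, by omega⟩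
        · rw [hMx', if_pos hq2, h2]
        · intro h
          rw [hcount h, hMx']
          by_cases hg : h = g
          · subst hg; rw [← hcount h]; omega
          · simp only [hg, if_false, add_zero]; exact h3 h
        · intro _
          obtain ⟨p1, p2, p3⟩ := h5 hq2
          rw [hMx']
          refine ⟨by omega, by rw [hpcpre _ p1]; exact p2, ?_⟩
          intro j hj
          rw [hpcpre _ (by omega)]
          exact p3 j hj

theorem goPeak_spec (p : List (List Char)) (m i0 : Nat)
    (hi0 : i0 < p.length) (hhit : pvPc p i0 = m) (hfirst : ∀ j < i0, pvPc p j ≠ m) :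
    ∀ (rest q : List (List Char)) (seen : PySem.Dict (List Char) Int),
      p = q ++ rest →
      (∀ g, seen.getD g 0 = (q.count g : Int)) →
      (∀ j < q.length, pvPc p j ≠ m) →
      q.length ≤ i0 →
      goPeak seen rest (m : Int) = [String.ofList (p.getD i0 [])] := by
  intro rest
  induction rest with
  | nil =>
    intro q seen hp _ _ hle
    exfalso
    rw [hp] at hi0
    simp at hi0
    omega
  | cons g rest' ih =>
    intro q seen hp hseen hmiss hle
    have hpc : pvPc p q.length = q.count g + 1 := by rw [hp]; exact pvPc_at q rest' g
    rw [goPeak]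
    simp only [hseen g]
    by_cases hc : ((q.count g : Int) + 1) = (m : Int)
    · rw [if_pos hc]
      have hm : pvPc p q.length = m := by omega
      have hi0eq : i0 = q.length := by
        rcases Nat.lt_or_ge q.length i0 with hlt | hge
        · exact absurd hm (hfirst _ hlt)
        · omega
      have : p.getD i0 [] = g := by
        rw [hp, hi0eq]
        simp [List.getD_eq_getElem?_getD]
      rw [this]
    · rw [if_neg hc]
      apply ih (q ++ [g]) _ (by rw [hp]; simp)
      · intro h
        rw [PySem.Dict.getD_insert, List.count_append]
        by_cases hg : h = g
        · subst hg
          simp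
        · simp [hg, Ne.symm hg, hseen h]
      · intro j hj
        rw [List.length_append, List.length_singleton] at hj
        rcases Nat.lt_or_ge j q.length with h1 | h1
        · exact hmiss j h1
        · have : j = q.length := by omega
          rw [this, hpc]
          intro he
          apply hc
          omega
      · rw [List.length_append, List.length_singleton]
        have : i0 ≠ q.length := by
          intro he
          apply hc
          rw [← he, hhit] at hpc
          omega
        omega

theorem counts_values (p : List (List Char)) :
    (p.foldl (fun d g => d.insert g (d.getD g 0 + 1))
      (PySem.Dict.empty : PySem.Dict (List Char) Int)).values =
    (PySem.Set.ofList p).map (fun k => (p.count k : Int)) := by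
  rw [PySem.Dict.foldl_insert_getD_add_one_eq_counter]
  simp only [PySem.Dict.values, PySem.Dict.items_counter, List.map_map]
  rfl

theorem max_counts (p : List (List Char)) (hne : p ≠ [])
    (hub : ∀ g, p.count g ≤ pvMx p) (g0 : List Char) (hg0 : g0 ∈ p)
    (hg0c : p.count g0 = pvMx p) :
    PySem.List.max? ((PySem.Set.ofList p).map (fun k => (p.count k : Int))) (fun x => x) =
      some ((pvMx p : Nat) : Int) := by
  have hlne : (PySem.Set.ofList p).map (fun k => (p.count k : Int)) ≠ [] := by
    have : g0 ∈ PySem.Set.ofList p := (PySem.Set.mem_ofList _ _).mpr hg0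
    intro he
    exact absurd (List.mem_map_of_mem this) (he ▸ List.not_mem_nil)
  cases hmq : PySem.List.max? ((PySem.Set.ofList p).map (fun k => (p.count k : Int))) (fun x => x) with
  | none => rw [PySem.List.max?_eq_none_iff] at hmq; exact absurd hmq hlne
  | some v =>
    have hv := PySem.List.max?_mem hmq
    have hmax := PySem.List.max?_isMax hmq
    obtain ⟨k, hk, hkv⟩ := List.mem_map.mp hv
    have hk' : k ∈ p := (PySem.Set.mem_ofList _ _).mp hk
    have h1 : v ≤ (pvMx p : Int) := by rw [← hkv]; exact_mod_cast hub k
    have h2 : ((pvMx p : Nat) : Int) ≤ v := by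
      have hmem : ((pvMx p : Nat) : Int) ∈ (PySem.Set.ofList p).map (fun k => (p.count k : Int)) := by
        refine List.mem_map.mpr ⟨g0, (PySem.Set.mem_ofList _ _).mpr hg0, by rw [hg0c]⟩
      exact hmax _ hmem
    congr 1
    omega

theorem pv_final (text : String) (N : Int) (hpre : Pre_mostFrequentNgram text N) :
    mostFrequentNgram text N = mostFrequentNgram_alt text N := by
  unfold mostFrequentNgram mostFrequentNgram_alt
  dsimp only
  set p := calcNgrams text N with hp
  have hne := calcNgrams_ne_nil text N hpre
  have hlen : 0 < p.length := List.length_pos_iff.mpr hne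
  obtain ⟨h1, h2, h3, h4, h5, h6⟩ := foldA_ok p
  set st := (PySem.List.enumerate p 0).foldl stepA ([], 0, 0) with hst
  set i0 := st.2.2.toNat with hi0def
  have hm1 : 1 ≤ pvMx p := by
    have := pvPc_le_pvMx p 0 hlen
    rw [pvPc_zero' p hne] at this
    exact this
  have hkey : i0 < p.length ∧ pvPc p i0 = pvMx p ∧ ∀ j < i0, pvPc p j ≠ pvMx p := by
    by_cases hm2 : 2 ≤ pvMx p
    · exact h5 hm2
    · have hmeq : pvMx p = 1 := by omega
      have hz : st.2.2 = 0 := h6 (by omega)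
      refine ⟨by rw [hi0def, hz]; exact hlen, ?_, ?_⟩
      · rw [hi0def, hz, hmeq]
        exact pvPc_zero' p hne
      · intro j hj
        rw [hi0def, hz] at hj
        omega
  obtain ⟨hi0, hhit, hfirst⟩ := hkey
  have hposint : st.2.2 = (i0 : Int) := by rw [hi0def, Int.toNat_of_nonneg h4]
  -- the element at the winning position
  have hget : PySem.List.pyGet? p st.2.2 = some (p.getD i0 []) := by
    rw [hposint, PySem.List.pyGet?_natCast, List.getD_eq_getElem?_getD,
      List.getElem?_eq_getElem hi0]
    rfl
  rw [hget]
  -- the count of that element is exactly the maximum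
  have hg0 : p.getD i0 [] ∈ p := by
    rw [List.getD_eq_getElem?_getD, List.getElem?_eq_getElem hi0]
    exact List.getElem_mem hi0
  have hg0c : p.count (p.getD i0 []) = pvMx p := by
    have hle := pvPc_le_count p i0
    have := h3 (p.getD i0 [])
    omega
  rw [counts_values, max_counts p hne h3 _ hg0 hg0c]
  dsimp only
  rw [goPeak_spec p (pvMx p) i0 hi0 hhit hfirst p [] PySem.Dict.empty (by simp)
    (by intro g; simp [PySem.Dict.getD_empty]) (by intro j hj; simp at hj) (Nat.zero_le _)]

-- ===== VERDICT (by name: the statement is the Claim_ definition above) =====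
theorem mostFrequentNgram_spec : Claim_equal_mostFrequentNgram := by
  intro text N _ hpre
  unfold Spec_mostFrequentNgram
  exact pv_final text N hpre
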